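-- pv_equiv track=rewrite | github.com/BenjiSomur/configuration | dotconfig/Code/User/History/-1fd6967c/uwZY.py | get_globals
-- ===== SOURCE A (Python) =====
-- from copy import deepcopy
--
-- def transpose_mat(ref):
--     aux = [list() for _ in range(len(ref))]
--     for line in ref:
--         for idx, val in enumerate(line):
--             aux[idx].append(val)
--     return aux
--
-- def sum_lines(arrx):
--     return list(map(lambda x: sum(x), arrx))
--
-- def get_globals(ref):
--     aux_ref = deepcopy(ref)
--     tr_aux = transpose_mat(aux_ref)
--     sums = sum_lines(aux_ref)
--     sums_tr = sum_lines(tr_aux)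
--     for idx, (val1, val2) in enumerate(zip(sums, sums_tr)):
--         if val1 == 0 or val2 == 0:
--             yield idx + 1
-- ===== SOURCE B (Python) =====
-- def get_globals(ref):
--     # Demand-driven: no deepcopy, no transpose, no precomputed sum lists.
--     # For each index, test the row sum and the column sum directly; the
--     # column sum reads entry idx of every row that has one (exactly the
--     # entries A's transpose would collect into bucket idx).
--     for idx in range(len(ref)):
--         if sum(ref[idx]) == 0 or sum(row[idx] for row in ref if idx < len(row)) == 0:
--             yield idx + 1
-- ===== Notes on version B (the rewrite author's own statement) =====
-- stated objective: alternative
-- what changed: Replaces deepcopy + materializing the transpose + two precomputed sum lists with a demand-driven generator that, for each index, sums the row directly and sums column idx on the fly over the rows that have an entry there, keeping no intermediate structures at all.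
import Mathlib
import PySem

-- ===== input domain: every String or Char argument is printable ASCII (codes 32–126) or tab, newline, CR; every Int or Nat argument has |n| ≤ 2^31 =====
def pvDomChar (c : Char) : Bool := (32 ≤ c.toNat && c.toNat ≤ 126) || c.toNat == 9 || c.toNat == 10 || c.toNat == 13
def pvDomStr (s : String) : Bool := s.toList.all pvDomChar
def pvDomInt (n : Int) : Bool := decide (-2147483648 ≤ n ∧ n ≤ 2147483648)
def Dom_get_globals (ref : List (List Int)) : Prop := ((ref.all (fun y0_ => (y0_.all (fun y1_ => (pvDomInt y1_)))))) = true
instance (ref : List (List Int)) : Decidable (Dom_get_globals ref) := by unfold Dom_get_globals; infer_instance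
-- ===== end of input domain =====

-- B replaces A's deepcopy + materialized transpose + two precomputed sum lists with a
-- demand-driven per-index test: for each index it sums the row and the column directly.


-- ===== PORT A =====
def transpose_mat (ref : List (List Int)) : List (List Int) :=
  ref.foldl
    (fun aux line =>
      (PySem.List.enumerate line 0).foldl
        (fun aux p =>
          PySem.List.pySetD aux p.1 (PySem.List.pyGetD aux p.1 [] ++ [p.2]))
        aux)
    (List.replicate ref.length [])

def sum_lines (arrx : List (List Int)) : List Int := arrx.map (fun x => x.sum)

def get_globals (ref : List (List Int)) : List Int :=
  let aux_ref := ref          -- deepcopy of an int matrix: identical value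
  let tr_aux := transpose_mat aux_ref
  let sums := sum_lines aux_ref
  let sums_tr := sum_lines tr_aux
  (PySem.List.enumerate (sums.zip sums_tr) 0).foldl
    (fun acc p => if p.2.1 == 0 || p.2.2 == 0 then acc ++ [p.1 + 1] else acc) []

-- ===== PORT B =====
-- for idx in range(len(ref)):
--   if sum(ref[idx]) == 0 or sum(row[idx] for row in ref if idx < len(row)) == 0: yield idx+1
def get_globals_alt (ref : List (List Int)) : List Int :=
  (PySem.List.pyRange 0 (ref.length : Int) 1).foldl
    (fun acc idx =>
      if (PySem.List.pyGetD ref idx []).sum == 0 ||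
         ref.foldl (fun s row =>
           if idx < (row.length : Int) then s + PySem.List.pyGetD row idx 0 else s) 0 == 0
      then acc ++ [idx + 1] else acc) []

-- ===== PRECONDITION & SPEC =====
-- Pre_ excludes exactly the inputs where A raises IndexError (a row longer than the
-- number of rows overruns the transpose buckets).
def Pre_get_globals (ref : List (List Int)) : Prop :=
  ∀ line ∈ ref, line.length ≤ ref.length
instance (ref : List (List Int)) : Decidable (Pre_get_globals ref) := by
  unfold Pre_get_globals; infer_instance
def pvWitness_get_globals : List (List Int) := [[1, -1], [2, 3]]

def Spec_get_globals (ref : List (List Int)) (out : List Int) : Prop := out = get_globals_alt ref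
instance (ref : List (List Int)) (out : List Int) : Decidable (Spec_get_globals ref out) := by unfold Spec_get_globals; infer_instance

-- ===== CLAIM (what is proved, stated in full; the proofs are below) =====
def Claim_equal_get_globals : Prop := ∀ (ref : List (List Int)), Dom_get_globals ref → Pre_get_globals ref → Spec_get_globals ref (get_globals ref)

-- ===== LEMMAS AND PROOFS =====

-- A's result in the accumulator form: row sums and column sums built in one pass,
-- then the same index loop; proof-only intermediate between the two ports.
def midForm (ref : List (List Int)) : List Int :=
  let st := ref.foldl
    (fun (st : List Int × List Int) row =>
      (st.1 ++ [row.sum],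
       (PySem.List.enumerate row 0).foldl
         (fun cs p => PySem.List.pySetD cs p.1 (PySem.List.pyGetD cs p.1 0 + p.2))
         st.2))
    ([], List.replicate ref.length 0)
  (PySem.List.pyRange 0 (ref.length : Int) 1).foldl
    (fun acc j =>
      if PySem.List.pyGetD st.1 j 0 == 0 || PySem.List.pyGetD st.2 j 0 == 0
      then acc ++ [j + 1] else acc)
    []

-- length preservation of the transpose inner fold
theorem len_foldA (ps : List (Int × Int)) :
    ∀ (aux : List (List Int)),
      ((ps.foldl (fun aux p =>
          PySem.List.pySetD aux p.1 (PySem.List.pyGetD aux p.1 [] ++ [p.2])) aux)).length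
        = aux.length := by
  induction ps with
  | nil => intro aux; rfl
  | cons p ps ih =>
      intro aux
      simp only [List.foldl_cons, ih, PySem.List.length_pySetD]

-- one in-range transpose append step commutes with mapping List.sum
theorem step_mapsum (aux : List (List Int)) (n : Nat) (hn : n < aux.length) (v : Int) :
    (PySem.List.pySetD aux (n : Int) (PySem.List.pyGetD aux (n : Int) [] ++ [v])).map List.sum
      = PySem.List.pySetD (aux.map List.sum) (n : Int)
          (PySem.List.pyGetD (aux.map List.sum) (n : Int) 0 + v) := by
  simp only [PySem.List.pySetD_natCast, PySem.List.pyGetD_natCast, List.map_set,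
    List.getD_eq_getElem?_getD, List.getElem?_map]
  congr 1
  rw [List.getElem?_eq_getElem hn]
  simp

-- the inner per-row fold: appending into buckets then summing = adding into sums
theorem inner_mapsum (line : List Int) :
    ∀ (n : Nat) (aux : List (List Int)), n + line.length ≤ aux.length →
      ((PySem.List.enumerate line (n : Int)).foldl
          (fun aux p =>
            PySem.List.pySetD aux p.1 (PySem.List.pyGetD aux p.1 [] ++ [p.2])) aux).map List.sum
        = (PySem.List.enumerate line (n : Int)).foldl
            (fun cs p => PySem.List.pySetD cs p.1 (PySem.List.pyGetD cs p.1 0 + p.2))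
            (aux.map List.sum) := by
  induction line with
  | nil => intro n aux _; simp [PySem.List.enumerate_nil]
  | cons x xs ih =>
      intro n aux h
      rw [PySem.List.enumerate_cons]
      simp only [List.foldl_cons]
      have hcast : (n : Int) + 1 = ((n + 1 : Nat) : Int) := by push_cast; ring
      rw [hcast,
        ih (n + 1) _ (by rw [PySem.List.length_pySetD]; simp at h ⊢; omega),
        step_mapsum aux n (by simp at h; omega) x]

-- the outer fold over all rows
theorem outer_mapsum (rows : List (List Int)) :
    ∀ (aux : List (List Int)), (∀ r ∈ rows, r.length ≤ aux.length) →
      ((rows.foldl (fun aux line =>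
          (PySem.List.enumerate line 0).foldl
            (fun aux p =>
              PySem.List.pySetD aux p.1 (PySem.List.pyGetD aux p.1 [] ++ [p.2])) aux) aux)).map List.sum
        = rows.foldl (fun cs line =>
            (PySem.List.enumerate line 0).foldl
              (fun cs p => PySem.List.pySetD cs p.1 (PySem.List.pyGetD cs p.1 0 + p.2)) cs)
            (aux.map List.sum) := by
  induction rows with
  | nil => intro aux _; rfl
  | cons r rows ih =>
      intro aux h
      simp only [List.foldl_cons]
      have h0 : ((PySem.List.enumerate r 0).foldl
          (fun cs p => PySem.List.pySetD cs p.1 (PySem.List.pyGetD cs p.1 0 + p.2))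
          (aux.map List.sum))
          = ((PySem.List.enumerate r 0).foldl
              (fun aux p =>
                PySem.List.pySetD aux p.1 (PySem.List.pyGetD aux p.1 [] ++ [p.2])) aux).map List.sum := by
        have := inner_mapsum r 0 aux (by simpa using h r List.mem_cons_self)
        simpa using this.symm
      rw [h0]
      exact ih _ (by intro q hq; rw [len_foldA]; exact h q (List.mem_cons_of_mem _ hq))

-- the final index loop over two lists equals A's enumerate-over-zip loop
theorem final_loop (s : List Int) :
    ∀ (t : List Int) (n : Nat) (fs ft : List Int) (init : List Int),
      fs.length = n + s.length → ft.length = n + t.length → t.length = s.length →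
      List.drop n fs = s → List.drop n ft = t →
      (PySem.List.pyRange (n : Int) (fs.length : Int) 1).foldl
          (fun acc j =>
            if PySem.List.pyGetD fs j 0 == 0 || PySem.List.pyGetD ft j 0 == 0
            then acc ++ [j + 1] else acc) init
        = (PySem.List.enumerate (s.zip t) (n : Int)).foldl
            (fun acc p => if p.2.1 == 0 || p.2.2 == 0 then acc ++ [p.1 + 1] else acc) init := by
  induction s with
  | nil =>
      intro t n fs ft init hfs hft hts _ _
      have ht : t = [] := List.eq_nil_of_length_eq_zero (by simpa using hts)
      subst ht
      rw [PySem.List.pyRange_one_eq_nil (by simp at hfs; omega)]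
      simp [PySem.List.enumerate_nil]
  | cons x s' ih =>
      intro t n fs ft init hfs hft hts hds hdt
      match t, hts with
      | y :: t', hts =>
        have hx : PySem.List.pyGetD fs (n : Int) 0 = x := by
          rw [PySem.List.pyGetD_natCast, List.getD_eq_getElem?_getD]
          have h0 : (List.drop n fs)[0]? = fs[n + 0]? := List.getElem?_drop
          rw [hds] at h0
          simp at h0
          rw [← h0]; rfl
        have hy : PySem.List.pyGetD ft (n : Int) 0 = y := by
          rw [PySem.List.pyGetD_natCast, List.getD_eq_getElem?_getD]
          have h0 : (List.drop n ft)[0]? = ft[n + 0]? := List.getElem?_drop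
          rw [hdt] at h0
          simp at h0
          rw [← h0]; rfl
        have hlt : (n : Int) < (fs.length : Int) := by rw [hfs, List.length_cons]; push_cast; omega
        rw [PySem.List.pyRange_one_cons hlt]
        simp only [List.zip_cons_cons, PySem.List.enumerate_cons, List.foldl_cons, hx, hy]
        have hcast : (n : Int) + 1 = ((n + 1 : Nat) : Int) := by push_cast; ring
        rw [hcast]
        apply ih t' (n + 1) fs ft _ (by simp at hfs ⊢; omega) (by simp at hft ⊢; omega)
          (by simp at hts ⊢; omega)
        · have : List.drop (n + 1) fs = List.drop 1 (List.drop n fs) := by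
            rw [List.drop_drop]
          rw [this, hds]; rfl
        · have : List.drop (n + 1) ft = List.drop 1 (List.drop n ft) := by
            rw [List.drop_drop]
          rw [this, hdt]; rfl

-- length of the whole transpose fold
theorem len_outer (rows : List (List Int)) :
    ∀ (aux : List (List Int)),
      ((rows.foldl (fun aux line =>
          (PySem.List.enumerate line 0).foldl
            (fun aux p =>
              PySem.List.pySetD aux p.1 (PySem.List.pyGetD aux p.1 [] ++ [p.2])) aux) aux)).length
        = aux.length := by
  induction rows with
  | nil => intro aux; rfl
  | cons r rows ih => intro aux; simp only [List.foldl_cons, ih, len_foldA]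

-- A's port equals the accumulator form midForm on Pre_
theorem a_eq_mid (ref : List (List Int)) (hpre : Pre_get_globals ref) :
    get_globals ref = midForm ref := by
  simp only [get_globals, midForm]
  rw [show (fun (st : List Int × List Int) (row : List Int) =>
      (st.1 ++ [row.sum],
       (PySem.List.enumerate row 0).foldl
         (fun cs p => PySem.List.pySetD cs p.1 (PySem.List.pyGetD cs p.1 0 + p.2)) st.2))
    = (fun (st : List Int × List Int) (row : List Int) =>
      ((fun (a : List Int) (row : List Int) => a ++ [row.sum]) st.1 row,
       (fun (b : List Int) (row : List Int) => (PySem.List.enumerate row 0).foldl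
         (fun cs p => PySem.List.pySetD cs p.1 (PySem.List.pyGetD cs p.1 0 + p.2)) b) st.2 row)) from rfl]
  rw [PySem.List.foldl_prod_mk
    (fun (a : List Int) (row : List Int) => a ++ [row.sum])
    (fun (b : List Int) (row : List Int) =>
      (PySem.List.enumerate row 0).foldl
        (fun cs p => PySem.List.pySetD cs p.1 (PySem.List.pyGetD cs p.1 0 + p.2)) b)
    ref [] (List.replicate ref.length 0)]
  simp only [PySem.List.foldl_append_singleton_eq_map, List.nil_append]
  have hlen_tr : (transpose_mat ref).length = ref.length := by
    unfold transpose_mat; rw [len_outer]; simp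
  have hcols : ref.foldl (fun cs line =>
        (PySem.List.enumerate line 0).foldl
          (fun cs p => PySem.List.pySetD cs p.1 (PySem.List.pyGetD cs p.1 0 + p.2)) cs)
        (List.replicate ref.length (0 : Int))
      = (transpose_mat ref).map List.sum := by
    unfold transpose_mat
    have := outer_mapsum ref (List.replicate ref.length []) (by simpa using hpre)
    simpa [List.map_replicate] using this.symm
  rw [hcols]
  have := final_loop (ref.map fun x => x.sum) ((transpose_mat ref).map List.sum) 0
      (ref.map fun x => x.sum) ((transpose_mat ref).map List.sum) []
      (by simp) (by simp) (by simp [hlen_tr]) (by simp) (by simp)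
  unfold transpose_mat sum_lines at *
  simpa [hlen_tr] using this.symm

-- entry j of the column-accumulation inner fold: a single conditional increment
theorem innerGet (row : List Int) :
    ∀ (k : Nat) (cs : List Int), k + row.length ≤ cs.length → ∀ (j : Nat),
      PySem.List.pyGetD
        ((PySem.List.enumerate row (k : Int)).foldl
          (fun cs p => PySem.List.pySetD cs p.1 (PySem.List.pyGetD cs p.1 0 + p.2)) cs)
        (j : Int) 0
      = if k ≤ j ∧ j < k + row.length
        then PySem.List.pyGetD cs (j : Int) 0 + PySem.List.pyGetD row ((j - k : Nat) : Int) 0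
        else PySem.List.pyGetD cs (j : Int) 0 := by
  induction row with
  | nil =>
      intro k cs _ j
      rw [PySem.List.enumerate_nil]
      simp only [List.foldl_nil]
      rw [if_neg (by simp only [List.length_nil]; omega)]
  | cons x xs ih =>
      intro k cs h j
      rw [PySem.List.enumerate_cons]
      simp only [List.foldl_cons]
      have hklt : k < cs.length := by simp at h; omega
      have hcast : (k : Int) + 1 = ((k + 1 : Nat) : Int) := by push_cast; ring
      rw [hcast, ih (k + 1) _ (by rw [PySem.List.length_pySetD]; simp at h ⊢; omega) j]
      rw [PySem.List.pyGetD_pySetD_natCast cs k j _ 0 hklt]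
      by_cases hjk : j = k
      · subst hjk
        simp only [if_true, List.length_cons]
        rw [if_neg (by omega), if_pos (by omega)]
        rw [Nat.sub_self]
        simp [PySem.List.pyGetD_natCast]
      · simp only [if_neg hjk, List.length_cons]
        by_cases hin : k + 1 ≤ j ∧ j < k + 1 + xs.length
        · rw [if_pos hin, if_pos (by omega)]
          congr 1
          have hsub : j - k = (j - (k + 1)) + 1 := by omega
          rw [hsub, PySem.List.pyGetD_natCast, PySem.List.pyGetD_natCast, List.getD_cons_succ]
        · rw [if_neg hin, if_neg (by omega)]

-- length preservation of the column-accumulation inner fold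
theorem len_foldC (ps : List (Int × Int)) :
    ∀ (cs : List Int),
      ((ps.foldl (fun cs p =>
          PySem.List.pySetD cs p.1 (PySem.List.pyGetD cs p.1 0 + p.2)) cs)).length
        = cs.length := by
  induction ps with
  | nil => intro cs; rfl
  | cons p ps ih =>
      intro cs
      simp only [List.foldl_cons, ih, PySem.List.length_pySetD]

-- entry j of the whole column accumulation = B's direct column sum
theorem colEntry (rows : List (List Int)) :
    ∀ (cs : List Int), (∀ r ∈ rows, r.length ≤ cs.length) → ∀ (j : Nat),
      PySem.List.pyGetD
        (rows.foldl (fun cs line =>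
          (PySem.List.enumerate line 0).foldl
            (fun cs p => PySem.List.pySetD cs p.1 (PySem.List.pyGetD cs p.1 0 + p.2)) cs) cs)
        (j : Int) 0
      = rows.foldl (fun s row =>
          if (j : Int) < (row.length : Int) then s + PySem.List.pyGetD row (j : Int) 0 else s)
          (PySem.List.pyGetD cs (j : Int) 0) := by
  induction rows with
  | nil => intro cs _ j; rfl
  | cons r rows ih =>
      intro cs h j
      simp only [List.foldl_cons]
      rw [ih _ (by
        intro q hq
        rw [len_foldC]
        exact h q (List.mem_cons_of_mem _ hq))]
      congr 1
      have h0 := innerGet r 0 cs (by simpa using h r List.mem_cons_self) j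
      simp only [Nat.zero_add, Nat.sub_zero, Nat.zero_le, true_and, Nat.cast_zero] at h0
      rw [h0]
      by_cases hj : j < r.length
      · rw [if_pos hj, if_pos (by exact_mod_cast hj)]
      · rw [if_neg hj, if_neg (by exact_mod_cast hj)]

-- the accumulator form equals B's demand-driven port on Pre_
theorem mid_eq_alt (ref : List (List Int)) (hpre : Pre_get_globals ref) :
    midForm ref = get_globals_alt ref := by
  simp only [midForm, get_globals_alt]
  rw [show (fun (st : List Int × List Int) (row : List Int) =>
      (st.1 ++ [row.sum],
       (PySem.List.enumerate row 0).foldl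
         (fun cs p => PySem.List.pySetD cs p.1 (PySem.List.pyGetD cs p.1 0 + p.2)) st.2))
    = (fun (st : List Int × List Int) (row : List Int) =>
      ((fun (a : List Int) (row : List Int) => a ++ [row.sum]) st.1 row,
       (fun (b : List Int) (row : List Int) => (PySem.List.enumerate row 0).foldl
         (fun cs p => PySem.List.pySetD cs p.1 (PySem.List.pyGetD cs p.1 0 + p.2)) b) st.2 row)) from rfl]
  rw [PySem.List.foldl_prod_mk
    (fun (a : List Int) (row : List Int) => a ++ [row.sum])
    (fun (b : List Int) (row : List Int) =>
      (PySem.List.enumerate row 0).foldl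
        (fun cs p => PySem.List.pySetD cs p.1 (PySem.List.pyGetD cs p.1 0 + p.2)) b)
    ref [] (List.replicate ref.length 0)]
  simp only [PySem.List.foldl_append_singleton_eq_map, List.nil_append]
  apply PySem.List.foldl_congr_mem
  intro acc j hj
  obtain ⟨hj0, hjn⟩ := PySem.List.mem_pyRange_one.mp hj
  obtain ⟨m, rfl⟩ : ∃ m : Nat, j = (m : Int) := ⟨j.toNat, (Int.toNat_of_nonneg hj0).symm⟩
  have h1 : PySem.List.pyGetD (ref.map (fun x => x.sum)) (m : Int) 0
      = (PySem.List.pyGetD ref (m : Int) []).sum := by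
    simpa using PySem.List.pyGetD_map (fun x => List.sum x) ref (m : Int) []
  have h2 := colEntry ref (List.replicate ref.length 0) (by simpa using hpre) m
  have hz : PySem.List.pyGetD (List.replicate ref.length (0 : Int)) (m : Int) 0 = 0 := by
    rw [PySem.List.pyGetD_natCast, List.getD_eq_getElem?_getD, List.getElem?_replicate]
    split <;> simp
  rw [hz] at h2
  rw [h1, h2]

-- ===== VERDICT (by name: the statement is the Claim_ definition above) =====
theorem get_globals_spec : Claim_equal_get_globals := by
  intro ref _ hpre
  unfold Spec_get_globals
  rw [a_eq_mid ref hpre, mid_eq_alt ref hpre]
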